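-- pv_equiv track=rewrite | github.com/jin2001-2001/dist_research | Dora_toolbox/Simulator/utils.py | start_phase_time_est
-- ===== SOURCE A (Python) =====
-- def start_phase_time_est(P, B_list, d):
--     """
--     Implements StartPhaseTimeEst.
--     """
--     B_ft, B_bt = B_list
--     S = len(P)
--     CritiPathT = 0
--
--     for p in range(d, S):
--         CurrPathT = 0
--
--         for i in range(p+1): #necessary sub_path
--             CurrPathT += B_ft[i]
--
--         CurrPathT +=(S - (p+1)) * max(B_ft[0:p+1]) #rest for max blks
--
--         for i in range(d+1, p+1):
--             CurrPathT += B_bt[i]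
--
--         if CurrPathT > CritiPathT:
--             CritiPathT = CurrPathT
--
--     return CritiPathT
-- ===== SOURCE B (Python) =====
-- def start_phase_time_est(P, B_list, d):
--     B_ft, B_bt = B_list
--     S = len(P)
--     best = 0
--     if d < S:
--         prefix = sum(B_ft[:d+1])
--         mx = max(B_ft[:d+1])
--         bsum = 0
--         for p in range(d, S):
--             if p > d:
--                 prefix += B_ft[p]
--                 bsum += B_bt[p]
--                 if B_ft[p] > mx:
--                     mx = B_ft[p]
--             cand = prefix + (S - p - 1) * mx + bsum
--             if cand > best:
--                 best = cand
--     return best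
-- ===== Notes on version B (the rewrite author's own statement) =====
-- stated objective: faster
-- what changed: Replaced the O(S^2) recomputation of prefix sum, slice max and back-time sum for every partition point with a single pass that maintains all three as running accumulators; Pre_ excludes exactly the inputs where A raises (d < 0, or B_ft/B_bt too short for the indices the loop touches).
import Mathlib
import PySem

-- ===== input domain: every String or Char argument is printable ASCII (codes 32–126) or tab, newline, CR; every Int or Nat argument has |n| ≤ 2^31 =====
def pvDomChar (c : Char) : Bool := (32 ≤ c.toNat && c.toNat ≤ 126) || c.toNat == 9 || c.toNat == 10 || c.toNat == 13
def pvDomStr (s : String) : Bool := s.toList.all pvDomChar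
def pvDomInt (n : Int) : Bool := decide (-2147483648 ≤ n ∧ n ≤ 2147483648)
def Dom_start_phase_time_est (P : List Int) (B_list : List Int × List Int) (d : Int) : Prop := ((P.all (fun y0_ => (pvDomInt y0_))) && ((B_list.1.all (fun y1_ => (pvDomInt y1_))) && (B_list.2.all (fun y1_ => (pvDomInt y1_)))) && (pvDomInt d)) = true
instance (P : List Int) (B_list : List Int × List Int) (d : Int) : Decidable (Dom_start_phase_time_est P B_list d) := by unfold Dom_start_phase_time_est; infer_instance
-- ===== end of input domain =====

-- B replaces A's per-partition-point inner loops (prefix sum, slice max, back-time sum)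
-- with running accumulators maintained in one pass: O(S) instead of O(S^2).

-- ===== PORT A =====
def start_phase_time_est (P : List Int) (B_list : List Int × List Int) (d : Int) : Int :=
  let B_ft := B_list.1
  let B_bt := B_list.2
  let S : Int := (P.length : Int)
  (PySem.List.pyRange d S 1).foldl (fun CritiPathT p =>
    let c1 := (PySem.List.pyRange 0 (p+1) 1).foldl
      (fun acc i => acc + PySem.List.pyGetD B_ft i 0) 0
    let c2 := c1 + (S - (p+1)) *
      ((PySem.List.max? (PySem.List.slice B_ft (some 0) (some (p+1))) (fun y => y)).getD 0)
    let c3 := (PySem.List.pyRange (d+1) (p+1) 1).foldl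
      (fun acc i => acc + PySem.List.pyGetD B_bt i 0) c2
    if c3 > CritiPathT then c3 else CritiPathT) 0

-- ===== PORT B =====
def start_phase_time_est_alt (P : List Int) (B_list : List Int × List Int) (d : Int) : Int :=
  let B_ft := B_list.1
  let B_bt := B_list.2
  let S : Int := (P.length : Int)
  if d < S then
    let pre0 := (PySem.List.slice B_ft (some 0) (some (d+1))).sum
    let mx0 := (PySem.List.max? (PySem.List.slice B_ft (some 0) (some (d+1))) (fun y => y)).getD 0
    let st := (PySem.List.pyRange d S 1).foldl
      (fun (st : Int × Int × Int × Int) p =>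
        let upd :=
          if d < p then
            (st.1 + PySem.List.pyGetD B_ft p 0,
             (if PySem.List.pyGetD B_ft p 0 > st.2.1 then PySem.List.pyGetD B_ft p 0 else st.2.1),
             st.2.2.1 + PySem.List.pyGetD B_bt p 0)
          else (st.1, st.2.1, st.2.2.1)
        let cand := upd.1 + (S - p - 1) * upd.2.1 + upd.2.2
        (upd.1, upd.2.1, upd.2.2, if cand > st.2.2.2 then cand else st.2.2.2))
      (pre0, mx0, 0, 0)
    st.2.2.2
  else 0

-- ===== PRECONDITION & SPEC =====
-- Pre_ is exactly the set of inputs on which the Python A returns normally: A raises when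
-- d < 0 (empty-slice max / ValueError) or when B_ft (resp. B_bt) is too short for the
-- indices the loops touch (IndexError).
def Pre_start_phase_time_est (P : List Int) (B_list : List Int × List Int) (d : Int) : Prop :=
  0 ≤ d ∧ (d < (P.length : Int) → (P.length : Int) ≤ (B_list.1.length : Int)) ∧
  (d + 1 < (P.length : Int) → (P.length : Int) ≤ (B_list.2.length : Int))
instance (P : List Int) (B_list : List Int × List Int) (d : Int) : Decidable (Pre_start_phase_time_est P B_list d) := by unfold Pre_start_phase_time_est; infer_instance
def pvWitness_start_phase_time_est : List Int × (List Int × List Int) × Int := ([1, 2, 3], ([2, 1, 4], [1, 1, 1]), 1)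

def Spec_start_phase_time_est (P : List Int) (B_list : List Int × List Int) (d : Int) (out : Int) : Prop := out = start_phase_time_est_alt P B_list d
instance (P : List Int) (B_list : List Int × List Int) (d : Int) (out : Int) : Decidable (Spec_start_phase_time_est P B_list d out) := by unfold Spec_start_phase_time_est; infer_instance

-- ===== CLAIM (what is proved, stated in full; the proofs are below) =====
def Claim_equal_start_phase_time_est : Prop := ∀ (P : List Int) (B_list : List Int × List Int) (d : Int), Dom_start_phase_time_est P B_list d → Pre_start_phase_time_est P B_list d → Spec_start_phase_time_est P B_list d (start_phase_time_est P B_list d)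

-- ===== LEMMAS AND PROOFS =====

-- canonical values of the three accumulators after processing partition point a
def pvPf (B_ft : List Int) (a : Int) : Int :=
  ((PySem.List.pyRange 0 (a+1) 1).map (fun i => PySem.List.pyGetD B_ft i 0)).sum
def pvBs (B_bt : List Int) (d a : Int) : Int :=
  ((PySem.List.pyRange (d+1) (a+1) 1).map (fun i => PySem.List.pyGetD B_bt i 0)).sum
def pvMx (B_ft : List Int) (a : Int) : Int :=
  (PySem.List.max? (PySem.List.slice B_ft (some 0) (some (a+1))) (fun y => y)).getD 0
def pvCand (B_ft B_bt : List Int) (S d p : Int) : Int :=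
  pvPf B_ft p + (S - (p+1)) * pvMx B_ft p + pvBs B_bt d p

theorem pvPf_succ (B_ft : List Int) (a : Int) (h : 0 ≤ a) :
    pvPf B_ft a = pvPf B_ft (a-1) + PySem.List.pyGetD B_ft a 0 := by
  unfold pvPf
  have ha : a - 1 + 1 = a := by ring
  rw [ha, PySem.List.pyRange_one_succ_right h]
  simp

theorem pvBs_succ (B_bt : List Int) (d a : Int) (h : d + 1 ≤ a) :
    pvBs B_bt d a = pvBs B_bt d (a-1) + PySem.List.pyGetD B_bt a 0 := by
  unfold pvBs
  have ha : a - 1 + 1 = a := by ring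
  rw [ha, PySem.List.pyRange_one_succ_right h]
  simp

theorem pvMax_append_singleton (l : List Int) (x : Int) (h : l ≠ []) :
    (PySem.List.max? (l ++ [x]) (fun y => y)).getD 0 =
      (if x > (PySem.List.max? l (fun y => y)).getD 0 then x
       else (PySem.List.max? l (fun y => y)).getD 0) := by
  obtain ⟨c, t, rfl⟩ := List.exists_cons_of_ne_nil h
  rw [List.cons_append, PySem.List.max?_id_cons, PySem.List.max?_id_cons]
  simp only [Option.getD_some, List.foldl_append, List.foldl_cons, List.foldl_nil]
  by_cases hx : x > t.foldl max c
  · rw [if_pos hx, max_eq_right (le_of_lt hx)]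
  · rw [if_neg hx, max_eq_left (by omega)]

theorem pvMx_succ (B_ft : List Int) (a : Int) (h0 : 0 < a) (hlen : a < (B_ft.length : Int)) :
    pvMx B_ft a =
      (if PySem.List.pyGetD B_ft a 0 > pvMx B_ft (a-1) then PySem.List.pyGetD B_ft a 0
       else pvMx B_ft (a-1)) := by
  unfold pvMx
  obtain ⟨n, rfl⟩ : ∃ n : Nat, a = (n : Int) := ⟨a.toNat, (Int.toNat_of_nonneg (le_of_lt h0)).symm⟩
  have hn : 0 < n := by exact_mod_cast h0
  have hnl : n < B_ft.length := by exact_mod_cast hlen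
  have h1 : ((n : Int) + 1) = ((n + 1 : Nat) : Int) := by push_cast; ring
  have h2 : ((n : Int) - 1 + 1) = ((n : Nat) : Int) := by ring
  rw [h1, h2, PySem.List.slice_zero_start, PySem.List.slice_zero_start,
      PySem.List.slice_to_natCast, PySem.List.slice_to_natCast]
  have htake : B_ft.take (n+1) = B_ft.take n ++ [B_ft[n]] := by
    rw [List.take_add_one]
    simp [List.getElem?_eq_getElem hnl]
  have hget : PySem.List.pyGetD B_ft (n : Int) 0 = B_ft[n] := by
    simp [PySem.List.pyGetD_natCast, List.getElem?_eq_getElem hnl]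
  have hne : B_ft.take n ≠ [] := by
    have : (B_ft.take n).length = n := List.length_take_of_le (le_of_lt hnl)
    intro hc; rw [hc] at this; simp at this; omega
  rw [htake, pvMax_append_singleton _ _ hne, hget]

theorem pvMap_pyGetD_take (xs : List Int) (k : Nat) (hk : k ≤ xs.length) :
    (PySem.List.pyRange 0 (k : Int) 1).map (fun i => PySem.List.pyGetD xs i 0) = xs.take k := by
  induction k with
  | zero => simp [PySem.List.pyRange_one_eq_nil]
  | succ n ih =>
    have h1 : ((n + 1 : Nat) : Int) = (n : Int) + 1 := by push_cast; ring
    rw [h1, PySem.List.pyRange_one_succ_right (by positivity : (0:Int) ≤ (n:Int)),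
        List.map_append, ih (by omega), List.take_add_one]
    have hn : n < xs.length := by omega
    simp [List.getElem?_eq_getElem hn, PySem.List.pyGetD_natCast]

-- A's outer loop body equals the canonical candidate fold body
theorem pvA_canonical (P : List Int) (B_list : List Int × List Int) (d : Int) :
    start_phase_time_est P B_list d =
      (PySem.List.pyRange d (P.length : Int) 1).foldl
        (fun m p =>
          if pvCand B_list.1 B_list.2 (P.length : Int) d p > m
          then pvCand B_list.1 B_list.2 (P.length : Int) d p else m) 0 := by
  unfold start_phase_time_est
  apply PySem.List.foldl_congr_mem
  intro m p _
  simp only [PySem.List.foldl_add]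
  unfold pvCand pvPf pvBs pvMx
  ring_nf

-- the one-pass loop invariant: starting from the canonical state for a-1, B's stateful
-- fold over pyRange a S computes the canonical running-max fold
theorem pvLinv (B_ft B_bt : List Int) (S d : Int) (hft : S ≤ (B_ft.length : Int)) :
    ∀ (n : Nat) (a m : Int), 0 ≤ d → d < a → a + (n : Int) = S →
    ((PySem.List.pyRange a S 1).foldl
      (fun (st : Int × Int × Int × Int) p =>
        let upd :=
          if d < p then
            (st.1 + PySem.List.pyGetD B_ft p 0,
             (if PySem.List.pyGetD B_ft p 0 > st.2.1 then PySem.List.pyGetD B_ft p 0 else st.2.1),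
             st.2.2.1 + PySem.List.pyGetD B_bt p 0)
          else (st.1, st.2.1, st.2.2.1)
        let cand := upd.1 + (S - p - 1) * upd.2.1 + upd.2.2
        (upd.1, upd.2.1, upd.2.2, if cand > st.2.2.2 then cand else st.2.2.2))
      (pvPf B_ft (a-1), pvMx B_ft (a-1), pvBs B_bt d (a-1), m)).2.2.2
    = (PySem.List.pyRange a S 1).foldl
        (fun m p => if pvCand B_ft B_bt S d p > m then pvCand B_ft B_bt S d p else m) m := by
  intro n
  induction n with
  | zero =>
    intro a m _ _ hS
    rw [PySem.List.pyRange_one_eq_nil (by omega)]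
    simp
  | succ k ih =>
    intro a m hd hda hS
    rw [PySem.List.pyRange_one_cons (a := a) (b := S) (by push_cast at hS ⊢; omega)]
    simp only [List.foldl_cons]
    have hup : (if d < a then
            (pvPf B_ft (a-1) + PySem.List.pyGetD B_ft a 0,
             (if PySem.List.pyGetD B_ft a 0 > pvMx B_ft (a-1) then PySem.List.pyGetD B_ft a 0 else pvMx B_ft (a-1)),
             pvBs B_bt d (a-1) + PySem.List.pyGetD B_bt a 0)
          else (pvPf B_ft (a-1), pvMx B_ft (a-1), pvBs B_bt d (a-1)))
        = (pvPf B_ft a, pvMx B_ft a, pvBs B_bt d a) := by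
      rw [if_pos hda]
      rw [← pvPf_succ B_ft a (by omega), ← pvBs_succ B_bt d a (by omega),
          ← pvMx_succ B_ft a (by omega) (by push_cast at hS ⊢; omega)]
    simp only [hup]
    have hcand : pvPf B_ft a + (S - a - 1) * pvMx B_ft a + pvBs B_bt d a
        = pvCand B_ft B_bt S d a := by unfold pvCand; ring_nf
    rw [hcand]
    have := ih (a+1) (if pvCand B_ft B_bt S d a > m then pvCand B_ft B_bt S d a else m)
      hd (by omega) (by push_cast at hS ⊢; omega)
    simpa using this

-- ===== VERDICT (by name: the statement is the Claim_ definition above) =====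
theorem start_phase_time_est_spec : Claim_equal_start_phase_time_est := by
  intro P B_list d _ hpre
  obtain ⟨hd, hft, _⟩ := hpre
  unfold Spec_start_phase_time_est
  rw [pvA_canonical]
  unfold start_phase_time_est_alt
  by_cases hdS : d < (P.length : Int)
  · rw [if_pos hdS]
    have hlen := hft hdS
    -- initial state is the canonical state for a = d
    have hpre0 : (PySem.List.slice B_list.1 (some 0) (some (d+1))).sum = pvPf B_list.1 d := by
      unfold pvPf
      have h1 : (d + 1) = (((d+1).toNat : Nat) : Int) := by omega
      rw [PySem.List.slice_zero_start, h1, PySem.List.slice_to_natCast,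
          pvMap_pyGetD_take B_list.1 (d+1).toNat (by omega)]
    have hbs0 : pvBs B_list.2 d d = 0 := by
      unfold pvBs
      rw [PySem.List.pyRange_one_eq_nil (by omega)]
      simp
    have hmx0 : (PySem.List.max? (PySem.List.slice B_list.1 (some 0) (some (d+1))) (fun y => y)).getD 0 = pvMx B_list.1 d := rfl
    rw [PySem.List.pyRange_one_cons (a := d) (b := (P.length : Int)) hdS]
    simp only [List.foldl_cons, hpre0, hmx0]
    rw [if_neg (lt_irrefl d)]
    have hE : pvPf B_list.1 d + ((P.length : Int) - d - 1) * pvMx B_list.1 d + 0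
        = pvCand B_list.1 B_list.2 (P.length : Int) d d := by
      unfold pvCand; rw [hbs0]; ring
    rw [hE]
    have hmain := pvLinv B_list.1 B_list.2 (P.length : Int) d hlen
      ((P.length : Int) - (d+1)).toNat (d+1)
      (if pvCand B_list.1 B_list.2 (P.length : Int) d d > 0 then pvCand B_list.1 B_list.2 (P.length : Int) d d else 0)
      hd (by omega) (by omega)
    simp only [add_sub_cancel_right] at hmain
    rw [hbs0] at hmain
    exact hmain.symm
  · rw [if_neg hdS, PySem.List.pyRange_one_eq_nil (by omega)]
    simp
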